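-- pv_equiv track=rewrite | github.com/jimbro1000/cas2bas | formats/Utility.py | find_verbosity
-- ===== SOURCE A (Python) =====
-- def find_verbosity(options):
--     result = 1
--     if len(options) > 0:
--         if any([op in ["-s", "--silent"] for op in options]):
--             result = 3
--         if any([op in ["-q", "--quiet"] for op in options]):
--             result = 2
--         if any([op in ["-v", "--verbose"] for op in options]):
--             result = 0
--     return result
-- ===== SOURCE B (Python) =====
-- def find_verbosity(options):
--     table = {"-v": 0, "--verbose": 0, "-q": 2, "--quiet": 2, "-s": 3, "--silent": 3}
--     present = {table[op] for op in options if op in table}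
--     for level in (0, 2, 3):
--         if level in present:
--             return level
--     return 1
-- ===== Notes on version B (the rewrite author's own statement) =====
-- stated objective: simpler
-- what changed: Replaces the three separate any-scans (each building a temporary list) with one pass that collects the levels of recognized flags via a flag->level table, then returns the first level present in precedence order (0, 2, 3), defaulting to 1.
import Mathlib
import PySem

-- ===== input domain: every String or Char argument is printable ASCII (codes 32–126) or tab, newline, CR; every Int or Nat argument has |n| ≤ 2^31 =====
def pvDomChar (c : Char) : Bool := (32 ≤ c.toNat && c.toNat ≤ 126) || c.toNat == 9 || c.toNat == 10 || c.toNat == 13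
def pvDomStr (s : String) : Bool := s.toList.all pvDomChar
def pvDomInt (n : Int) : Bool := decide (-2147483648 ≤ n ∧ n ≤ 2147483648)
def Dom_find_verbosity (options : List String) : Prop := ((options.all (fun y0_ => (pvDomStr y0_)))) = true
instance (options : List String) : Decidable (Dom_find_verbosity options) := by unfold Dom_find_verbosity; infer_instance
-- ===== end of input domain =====

-- B replaces A's three any-scans by one table-driven pass collecting present levels plus a precedence selection; objective: simpler.


-- ===== PORT A =====
-- literal transliteration: result = 1; guarded by len>0, three 'any' scans overwrite result in order silent, quiet, verbose
def find_verbosity (options : List String) : Int :=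
  let result : Int := 1
  if options.length > 0 then
    let result := if options.any (fun op => op == "-s" || op == "--silent") then 3 else result
    let result := if options.any (fun op => op == "-q" || op == "--quiet") then 2 else result
    let result := if options.any (fun op => op == "-v" || op == "--verbose") then 0 else result
    result
  else result

-- ===== PORT B =====
-- flag -> level table (Python dict, insertion order)
def fvTable : PySem.Dict String Int :=
  PySem.Dict.ofList [("-v", 0), ("--verbose", 0), ("-q", 2), ("--quiet", 2), ("-s", 3), ("--silent", 3)]

def find_verbosity_alt (options : List String) : Int :=
  let present : PySem.Set Int := options.foldl (fun s op =>
    match PySem.Dict.get? fvTable op with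
    | some v => PySem.Set.add s v
    | none => s) PySem.Set.empty
  match ([0, 2, 3] : List Int).find? (fun l => PySem.Set.contains present l) with
  | some l => l
  | none => 1

-- ===== PRECONDITION & SPEC =====
def Spec_find_verbosity (options : List String) (out : Int) : Prop := out = find_verbosity_alt options
instance (options : List String) (out : Int) : Decidable (Spec_find_verbosity options out) := by unfold Spec_find_verbosity; infer_instance

-- ===== CLAIM (what is proved, stated in full; the proofs are below) =====
def Claim_equal_find_verbosity : Prop := ∀ (options : List String), Dom_find_verbosity options → Spec_find_verbosity options (find_verbosity options)

-- ===== LEMMAS AND PROOFS =====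

-- membership in the folded 'present' set = the accumulator already has it, or some option maps to it
theorem fv_present_mem (options : List String) (s : PySem.Set Int) (v : Int) :
    PySem.Set.contains
      (options.foldl (fun s op =>
        match PySem.Dict.get? fvTable op with
        | some w => PySem.Set.add s w
        | none => s) s) v
      = (PySem.Set.contains s v || options.any (fun op => PySem.Dict.get? fvTable op == some v)) := by
  induction options generalizing s with
  | nil => simp
  | cons op rest ih =>
    simp only [List.foldl_cons, List.any_cons, ih]
    cases h : PySem.Dict.get? fvTable op with
    | none => simp
    | some w =>
      by_cases hw : w = v
      · subst hw; simp [PySem.Set.contains, PySem.Set.mem_add]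
      · have hwv : (w == v) = false := by simp [hw]
        simp [PySem.Set.contains, PySem.Set.mem_add, Ne.symm hw, hwv]

-- lookup in the table hits 'some v' exactly for the flags of level v
theorem fv_table0 (op : String) :
    (PySem.Dict.get? fvTable op == some (0:Int)) = (op == "-v" || op == "--verbose") := by
  rw [show fvTable = PySem.Dict.mk [("-v", 0), ("--verbose", 0), ("-q", 2), ("--quiet", 2), ("-s", 3), ("--silent", 3)] from by decide]
  simp only [PySem.Dict.get?_mk_cons]
  split_ifs with g1 g2 g3 g4 g5 g6
  · simp only [beq_iff_eq] at g1; subst g1; decide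
  · simp only [beq_iff_eq] at g2; subst g2; decide
  · simp only [beq_iff_eq] at g3; subst g3; decide
  · simp only [beq_iff_eq] at g4; subst g4; decide
  · simp only [beq_iff_eq] at g5; subst g5; decide
  · simp only [beq_iff_eq] at g6; subst g6; decide
  · simp_all [PySem.Dict.get?, eq_comm (a := op)]

theorem fv_table2 (op : String) :
    (PySem.Dict.get? fvTable op == some (2:Int)) = (op == "-q" || op == "--quiet") := by
  rw [show fvTable = PySem.Dict.mk [("-v", 0), ("--verbose", 0), ("-q", 2), ("--quiet", 2), ("-s", 3), ("--silent", 3)] from by decide]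
  simp only [PySem.Dict.get?_mk_cons]
  split_ifs with g1 g2 g3 g4 g5 g6
  · simp only [beq_iff_eq] at g1; subst g1; decide
  · simp only [beq_iff_eq] at g2; subst g2; decide
  · simp only [beq_iff_eq] at g3; subst g3; decide
  · simp only [beq_iff_eq] at g4; subst g4; decide
  · simp only [beq_iff_eq] at g5; subst g5; decide
  · simp only [beq_iff_eq] at g6; subst g6; decide
  · simp_all [PySem.Dict.get?, eq_comm (a := op)]

theorem fv_table3 (op : String) :
    (PySem.Dict.get? fvTable op == some (3:Int)) = (op == "-s" || op == "--silent") := by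
  rw [show fvTable = PySem.Dict.mk [("-v", 0), ("--verbose", 0), ("-q", 2), ("--quiet", 2), ("-s", 3), ("--silent", 3)] from by decide]
  simp only [PySem.Dict.get?_mk_cons]
  split_ifs with g1 g2 g3 g4 g5 g6
  · simp only [beq_iff_eq] at g1; subst g1; decide
  · simp only [beq_iff_eq] at g2; subst g2; decide
  · simp only [beq_iff_eq] at g3; subst g3; decide
  · simp only [beq_iff_eq] at g4; subst g4; decide
  · simp only [beq_iff_eq] at g5; subst g5; decide
  · simp only [beq_iff_eq] at g6; subst g6; decide
  · simp_all [PySem.Dict.get?, eq_comm (a := op)]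

-- ===== VERDICT (by name: the statement is the Claim_ definition above) =====
theorem find_verbosity_spec : Claim_equal_find_verbosity := by
  intro options _
  unfold Spec_find_verbosity find_verbosity find_verbosity_alt
  cases options with
  | nil => decide
  | cons o rest =>
    simp only [fv_present_mem, fv_table0, fv_table2, fv_table3, List.find?]
    cases hV : (o :: rest).any (fun op => op == "-v" || op == "--verbose") <;>
    cases hQ : (o :: rest).any (fun op => op == "-q" || op == "--quiet") <;>
    cases hS : (o :: rest).any (fun op => op == "-s" || op == "--silent") <;>
      simp [PySem.Set.empty, PySem.Set.contains]
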